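-- pv_equiv track=rewrite | github.com/James-Ferreira/uq-neuro-nao | src_py2/robot/conversation_manager.py | get_cumulative_multiple
-- ===== SOURCE A (Python) =====
-- def get_cumulative_multiple(list, multiple):
--
--     """Multiply a list ensuring continuity of cumulative values."""
--
--     cumulative_long_list = []
--
--     for i in range(multiple):
--         for j in range(len(list)):
--             if i == 0:
--                 cumulative_long_list.append(list[j])
--             else:
--                 cumulative_long_list.append(cumulative_long_list[-1] + list[j])
--
--     return cumulative_long_list
-- ===== SOURCE B (Python) =====
-- def get_cumulative_multiple(list, multiple):
--     """Multiply a list ensuring continuity of cumulative values."""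
--     n = len(list)
--     if n == 0 or multiple <= 0:
--         return []
--     pref = []
--     s = 0
--     for x in list:
--         s += x
--         pref.append(s)          # pref[j] = sum(list[:j+1])
--     last = list[-1]
--     total = pref[-1]
--     # closed form: element k of the output depends only on k, not on previous outputs
--     return [list[k] if k < n else last + (k // n - 1) * total + pref[k % n]
--             for k in range(n * multiple)]
-- ===== Notes on version B (the rewrite author's own statement) =====
-- stated objective: alternative
-- what changed: Replaces A's nested loops carrying a running accumulator across all m blocks by a closed form: one prefix-sum pass over the input, then each output element is computed independently from its flat index k as last + (k//n - 1)*total + pref[k%n] (random access, no dependence on previously produced outputs).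
import Mathlib
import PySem

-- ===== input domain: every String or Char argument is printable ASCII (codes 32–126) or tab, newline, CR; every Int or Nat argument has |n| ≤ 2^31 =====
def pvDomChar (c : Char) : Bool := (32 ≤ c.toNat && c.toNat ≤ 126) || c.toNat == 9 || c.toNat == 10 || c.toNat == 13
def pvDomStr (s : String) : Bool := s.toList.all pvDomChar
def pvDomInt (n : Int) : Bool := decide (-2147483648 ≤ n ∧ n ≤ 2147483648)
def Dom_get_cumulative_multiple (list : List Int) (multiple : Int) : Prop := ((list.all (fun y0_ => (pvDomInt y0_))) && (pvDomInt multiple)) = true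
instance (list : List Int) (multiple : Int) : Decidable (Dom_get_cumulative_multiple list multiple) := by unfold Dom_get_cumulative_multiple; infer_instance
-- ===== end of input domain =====

-- B replaces A's nested running-accumulator loops by a closed form: after one
-- prefix-sum pass, each output element is computed directly from its flat index k
-- as last + (k//n - 1)*sum + pref[k%n], with no dependence on previous outputs
-- (objective: alternative).


-- ===== PORT A =====
-- literal transliteration of A's nested loops; cumulative_long_list[-1] is read
-- only when the accumulator is nonempty, so pyGetD's default 0 is never used
def get_cumulative_multiple (list : List Int) (multiple : Int) : List Int :=
  (PySem.List.pyRange 0 multiple 1).foldl (fun acc i =>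
    (PySem.List.pyRange 0 (list.length : Int) 1).foldl (fun acc2 j =>
      if i = 0 then acc2 ++ [PySem.List.pyGetD list j 0]
      else acc2 ++ [PySem.List.pyGetD acc2 (-1) 0 + PySem.List.pyGetD list j 0]) acc) []

-- ===== PORT B =====
-- transliteration of Source B: guard, prefix-sum pass, then one comprehension over
-- range(n*multiple) computing each element by the closed-form index formula
def get_cumulative_multiple_alt (list : List Int) (multiple : Int) : List Int :=
  let n : Int := (list.length : Int)
  if list.length = 0 ∨ multiple ≤ 0 then []
  else
    let pref := (list.foldl (fun (p : Int × List Int) x => (p.1 + x, p.2 ++ [p.1 + x])) (0, [])).2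
    let last := PySem.List.pyGetD list (-1) 0
    let total := PySem.List.pyGetD pref (-1) 0
    (PySem.List.pyRange 0 (n * multiple) 1).map (fun k =>
      if k < n then PySem.List.pyGetD list k 0
      else last + (PySem.Int.floordiv k n - 1) * total + PySem.List.pyGetD pref (PySem.Int.mod k n) 0)

-- ===== PRECONDITION & SPEC =====
def Spec_get_cumulative_multiple (list : List Int) (multiple : Int) (out : List Int) : Prop := out = get_cumulative_multiple_alt list multiple
instance (list : List Int) (multiple : Int) (out : List Int) : Decidable (Spec_get_cumulative_multiple list multiple out) := by unfold Spec_get_cumulative_multiple; infer_instance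

-- ===== CLAIM (what is proved, stated in full; the proofs are below) =====
def Claim_equal_get_cumulative_multiple : Prop := ∀ (list : List Int) (multiple : Int), Dom_get_cumulative_multiple list multiple → Spec_get_cumulative_multiple list multiple (get_cumulative_multiple list multiple)

-- ===== LEMMAS AND PROOFS =====

-- the "running-sum tail" that follows the first block in both programs' outputs
def runTail (s : Int) : List Int → List Int
  | [] => []
  | x :: xs => (s + x) :: runTail (s + x) xs

theorem getLastD_append' (xs ys : List Int) (d : Int) (h : ys ≠ []) :
    (xs ++ ys).getLastD d = ys.getLastD d := by
  rw [List.getLastD_eq_getLast?, List.getLastD_eq_getLast?,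
    List.getLast?_append_of_ne_nil _ h]

theorem foldl_id_const {α β : Type} (l : List β) (acc : α) :
    l.foldl (fun a _ => a) acc = acc := by
  induction l generalizing acc with
  | nil => rfl
  | cons x xs ih => simp [ih]

theorem runTail_ne_nil (s : Int) (xs : List Int) (h : xs ≠ []) : runTail s xs ≠ [] := by
  cases xs with
  | nil => exact absurd rfl h
  | cons x xs => simp [runTail]

theorem length_runTail (s : Int) (xs : List Int) : (runTail s xs).length = xs.length := by
  induction xs generalizing s with
  | nil => rfl
  | cons x xs ih => simp [runTail, ih]

theorem getLastD_runTail (s : Int) (xs : List Int) (h : xs ≠ []) (d : Int) :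
    (runTail s xs).getLastD d = s + xs.sum := by
  induction xs generalizing s d with
  | nil => exact absurd rfl h
  | cons x xs ih =>
    rw [runTail, List.getLastD_cons]
    cases xs with
    | nil => simp [runTail]
    | cons y ys =>
      rw [ih (s+x) (by simp) (s+x)]
      simp
      ring

theorem runTail_append (s : Int) (xs ys : List Int) :
    runTail s (xs ++ ys) = runTail s xs ++ runTail (s + xs.sum) ys := by
  induction xs generalizing s with
  | nil => simp [runTail]
  | cons x xs ih =>
    simp only [List.cons_append, runTail, ih]
    simp
    ring_nf

-- shifting the seed shifts every element of the running-sum tail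
theorem runTail_shift (s t : Int) (xs : List Int) :
    runTail (s + t) xs = (runTail t xs).map (fun v => s + v) := by
  induction xs generalizing t with
  | nil => simp [runTail]
  | cons x xs ih =>
    simp only [runTail, List.map_cons, List.cons.injEq]
    exact ⟨by ring, by rw [add_assoc]; exact ih (t + x)⟩

-- B's prefix-sum loop computes (sum, runTail 0 list)
theorem b_fold (xs : List Int) (s : Int) (acc : List Int) :
    xs.foldl (fun (p : Int × List Int) x => (p.1 + x, p.2 ++ [p.1 + x])) (s, acc)
      = (s + xs.sum, acc ++ runTail s xs) := by
  induction xs generalizing s acc with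
  | nil => simp [runTail]
  | cons x xs ih =>
    simp only [List.foldl_cons, runTail, ih]
    rw [Prod.mk.injEq]
    constructor
    · simp; ring
    · simp

-- reading every index of a list back in order reproduces the list
theorem map_range_getD (xs : List Int) (d : Int) :
    (List.range xs.length).map (fun k => xs.getD k d) = xs := by
  apply List.ext_getElem
  · simp
  · intro i h1 h2
    simp only [List.getElem_map, List.getElem_range]
    exact List.getD_eq_getElem xs d h2

-- a map over pyRange a (a+N) is a map over List.range N
theorem map_pyRange_shift (N : Nat) (a : Int) (f : Int → Int) (g : Nat → Int)
    (h : ∀ k : Nat, k < N → f (a + (k : Int)) = g k) :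
    (PySem.List.pyRange a (a + (N : Int)) 1).map f = (List.range N).map g := by
  rw [PySem.List.pyRange_one]
  rw [show (a + (N : Int) - a).toNat = N by omega]
  rw [List.map_map]
  exact List.map_congr_left (fun k hk => h k (List.mem_range.mp hk))

-- A's inner loop for i ≠ 0, rewritten over the list itself
theorem inner_step (xs : List Int) : ∀ (acc : List Int), acc ≠ [] →
    xs.foldl (fun a v => a ++ [PySem.List.pyGetD a (-1) 0 + v]) acc
      = acc ++ runTail (acc.getLastD 0) xs := by
  induction xs with
  | nil => intro acc h; simp [runTail]
  | cons x xs ih =>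
    intro acc h
    simp only [List.foldl_cons]
    rw [PySem.List.pyGetD_neg_one acc 0 h]
    have hl2 : acc.getLast h = acc.getLastD 0 := by
      rw [List.getLastD_eq_getLast?, List.getLast?_eq_getLast_of_ne_nil h, Option.getD_some]
    rw [hl2, ih _ (by simp)]
    rw [getLastD_append' acc [acc.getLastD 0 + x] 0 (by simp)]
    rw [List.append_assoc]
    simp [runTail]

-- A's outer loop over the remaining iterations i = a, …, a+k-1 (all ≥ 1)
theorem outer_lem (list : List Int) (hl : list ≠ []) (k : Nat) :
    ∀ (a : Int) (acc : List Int), 1 ≤ a → acc ≠ [] →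
    (PySem.List.pyRange a (a + k) 1).foldl (fun acc i =>
      (PySem.List.pyRange 0 (list.length : Int) 1).foldl (fun acc2 j =>
        if i = 0 then acc2 ++ [PySem.List.pyGetD list j 0]
        else acc2 ++ [PySem.List.pyGetD acc2 (-1) 0 + PySem.List.pyGetD list j 0]) acc) acc
      = acc ++ runTail (acc.getLastD 0) ((List.replicate k list).flatten) := by
  induction k with
  | zero =>
    intro a acc ha hacc
    rw [PySem.List.pyRange_one_eq_nil (a := a) (b := a + ((0:Nat):Int)) (by omega)]
    simp [runTail]
  | succ k ih =>
    intro a acc ha hacc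
    rw [PySem.List.pyRange_one_cons (show a < a + (((k+1):Nat):Int) by push_cast; omega)]
    simp only [List.foldl_cons]
    have hne : a ≠ 0 := by omega
    have hbody :
        (PySem.List.pyRange 0 (list.length : Int) 1).foldl (fun acc2 j =>
          if a = 0 then acc2 ++ [PySem.List.pyGetD list j 0]
          else acc2 ++ [PySem.List.pyGetD acc2 (-1) 0 + PySem.List.pyGetD list j 0]) acc
          = acc ++ runTail (acc.getLastD 0) list := by
      simp only [if_neg hne]
      rw [PySem.List.foldl_pyRange_zero_pyGetD' list 0
        (fun a v => a ++ [PySem.List.pyGetD a (-1) 0 + v]) acc]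
      exact inner_step list acc hacc
    rw [hbody]
    rw [show a + (((k+1):Nat):Int) = (a + 1) + (k:Int) by push_cast; ring]
    rw [ih (a+1) _ (by omega) (by simp [hacc])]
    have hgl : (acc ++ runTail (acc.getLastD 0) list).getLastD 0
        = acc.getLastD 0 + list.sum := by
      rw [getLastD_append' _ _ _ (runTail_ne_nil _ _ hl)]
      exact getLastD_runTail _ _ hl 0
    rw [hgl, List.append_assoc]
    rw [List.replicate_succ, List.flatten_cons, runTail_append]

-- A as the canonical form: first block, then the running-sum tail
theorem a_canonical (list : List Int) (multiple : Int) (hl : list ≠ []) (hm : 0 < multiple) :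
    get_cumulative_multiple list multiple
      = list ++ runTail (list.getLastD 0) ((List.replicate (multiple - 1).toNat list).flatten) := by
  unfold get_cumulative_multiple
  rw [PySem.List.pyRange_one_cons (show (0:Int) < multiple by omega)]
  simp only [List.foldl_cons]
  simp only [if_true]
  rw [PySem.List.foldl_pyRange_zero_pyGetD' list 0 (fun a v => a ++ [v]) []]
  rw [show (0:Int) + 1 = 1 from by norm_num]
  rw [PySem.List.foldl_append_eq_flatMap (fun v => [v]) list []]
  simp only [List.nil_append, List.flatMap_singleton']
  conv_lhs => rw [show multiple = 1 + (((multiple-1).toNat : Nat):Int) from by omega]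
  rw [outer_lem list hl (multiple - 1).toNat 1 list (le_refl 1) hl]

-- B's map over the tail blocks i = i0, …, i0+t-1 (all ≥ 1) equals the running-sum tail
theorem b_blocks (list : List Int) (hl : list ≠ []) (t : Nat) :
    ∀ (i : Int), 1 ≤ i →
    (PySem.List.pyRange ((list.length : Int) * i) ((list.length : Int) * (i + t)) 1).map
      (fun k => if k < (list.length : Int) then PySem.List.pyGetD list k 0
        else list.getLastD 0
          + (PySem.Int.floordiv k (list.length : Int) - 1) * list.sum
          + PySem.List.pyGetD (runTail 0 list) (PySem.Int.mod k (list.length : Int)) 0)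
      = runTail (list.getLastD 0 + (i - 1) * list.sum) ((List.replicate t list).flatten) := by
  have hn : (0:Int) < (list.length : Int) := by
    simp [List.length_pos_iff]; exact hl
  induction t with
  | zero =>
    intro i hi
    rw [PySem.List.pyRange_one_eq_nil (le_of_eq (by push_cast; ring))]
    simp [runTail]
  | succ t ih =>
    intro i hi
    rw [PySem.List.pyRange_one_append ((list.length : Int) * i) ((list.length : Int) * (i + 1))
      ((list.length : Int) * (i + (((t+1):Nat):Int)))
      (by nlinarith) (by push_cast; nlinarith)]
    rw [List.map_append]
    have hblock :
        (PySem.List.pyRange ((list.length : Int) * i) ((list.length : Int) * (i + 1)) 1).map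
          (fun k => if k < (list.length : Int) then PySem.List.pyGetD list k 0
            else list.getLastD 0
              + (PySem.Int.floordiv k (list.length : Int) - 1) * list.sum
              + PySem.List.pyGetD (runTail 0 list) (PySem.Int.mod k (list.length : Int)) 0)
          = runTail (list.getLastD 0 + (i - 1) * list.sum) list := by
      have hsp : (list.length : Int) * (i + 1) = (list.length : Int) * i + (list.length : Int) := by ring
      rw [hsp]
      rw [map_pyRange_shift list.length ((list.length : Int) * i) _
        (fun k => list.getLastD 0 + (i - 1) * list.sum + (runTail 0 list).getD k 0)]
      · calc (List.range list.length).map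
              (fun k => list.getLastD 0 + (i - 1) * list.sum + (runTail 0 list).getD k 0)
            = ((List.range (runTail 0 list).length).map
                (fun k => (runTail 0 list).getD k 0)).map
                (fun v => list.getLastD 0 + (i - 1) * list.sum + v) := by
              rw [List.map_map, length_runTail]
              rfl
          _ = (runTail 0 list).map (fun v => list.getLastD 0 + (i - 1) * list.sum + v) := by
              rw [map_range_getD]
          _ = runTail (list.getLastD 0 + (i - 1) * list.sum) list := by
              rw [← runTail_shift]
              norm_num
      · intro k hk
        have hklt : (k : Int) < (list.length : Int) := by exact_mod_cast hk
        have hnotlt : ¬ ((list.length : Int) * i + (k : Int) < (list.length : Int)) := by nlinarith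
        rw [if_neg hnotlt]
        have hdiv : PySem.Int.floordiv ((list.length : Int) * i + (k : Int)) (list.length : Int) = i := by
          rw [PySem.Int.floordiv_eq_iff_of_pos hn]
          constructor
          · nlinarith
          · nlinarith
        have hmod : PySem.Int.mod ((list.length : Int) * i + (k : Int)) (list.length : Int) = (k : Int) := by
          have := PySem.Int.floordiv_mul_add_mod ((list.length : Int) * i + (k : Int)) (list.length : Int)
          rw [hdiv] at this
          nlinarith [this]
        rw [hdiv, hmod, PySem.List.pyGetD_natCast]
    rw [hblock]
    rw [show (list.length : Int) * (i + (((t+1):Nat):Int)) = (list.length : Int) * ((i + 1) + (t:Int)) from by push_cast; ring]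
    rw [ih (i + 1) (by omega)]
    rw [List.replicate_succ, List.flatten_cons, runTail_append]
    congr 2
    ring

-- ===== VERDICT (by name: the statement is the Claim_ definition above) =====
theorem get_cumulative_multiple_spec : Claim_equal_get_cumulative_multiple := by
  intro list multiple _
  unfold Spec_get_cumulative_multiple
  by_cases hdeg : list.length = 0 ∨ multiple ≤ 0
  · have halt : get_cumulative_multiple_alt list multiple = [] := by
      unfold get_cumulative_multiple_alt
      rw [if_pos hdeg]
    rw [halt]
    unfold get_cumulative_multiple
    rcases hdeg with hl | hm
    · rw [List.length_eq_zero_iff.mp hl]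
      simp only [List.length_nil, Nat.cast_zero]
      rw [PySem.List.pyRange_one_eq_nil (a := 0) (b := 0) le_rfl]
      simp only [List.foldl_nil]
      rw [foldl_id_const]
    · rw [PySem.List.pyRange_one_eq_nil (a := 0) (b := multiple) (by omega)]
      rfl
  · obtain ⟨hl0, hm⟩ := not_or.mp hdeg
    have hl : list ≠ [] := by
      intro h; exact hl0 (by simp [h])
    have hm' : 0 < multiple := by omega
    have hn : (0:Int) < (list.length : Int) := by
      simp [List.length_pos_iff]; exact hl
    rw [a_canonical list multiple hl hm']
    unfold get_cumulative_multiple_alt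
    rw [if_neg (not_or.mpr ⟨hl0, by omega⟩)]
    simp only []
    rw [b_fold list 0 []]
    simp only [List.nil_append]
    have hlast : PySem.List.pyGetD list (-1) 0 = list.getLastD 0 := by
      rw [PySem.List.pyGetD_neg_one list 0 hl, List.getLastD_eq_getLast?,
        List.getLast?_eq_getLast_of_ne_nil hl, Option.getD_some]
    have htotal : PySem.List.pyGetD (runTail 0 list) (-1) 0 = list.sum := by
      have h2 := getLastD_runTail 0 list hl 0
      rw [List.getLastD_eq_getLast?, List.getLast?_eq_getLast_of_ne_nil (runTail_ne_nil 0 list hl),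
        Option.getD_some] at h2
      rw [PySem.List.pyGetD_neg_one _ 0 (runTail_ne_nil 0 list hl), h2]
      ring
    rw [hlast, htotal]
    have hcast : (((multiple - 1).toNat : Nat) : Int) = multiple - 1 := Int.toNat_of_nonneg (by omega)
    rw [show (list.length : Int) * multiple
        = (list.length : Int) * 1 + (list.length : Int) * (((multiple - 1).toNat : Nat) : Int) from by
      rw [hcast]; ring]
    rw [PySem.List.pyRange_one_append 0 ((list.length : Int) * 1)
      ((list.length : Int) * 1 + (list.length : Int) * (((multiple - 1).toNat : Nat) : Int))
      (by nlinarith) (by nlinarith [Int.natCast_nonneg ((multiple - 1).toNat)])]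
    rw [List.map_append]
    have hfirst :
        (PySem.List.pyRange 0 ((list.length : Int) * 1) 1).map
          (fun k => if k < (list.length : Int) then PySem.List.pyGetD list k 0
            else list.getLastD 0
              + (PySem.Int.floordiv k (list.length : Int) - 1) * list.sum
              + PySem.List.pyGetD (runTail 0 list) (PySem.Int.mod k (list.length : Int)) 0)
          = list := by
      rw [show ((list.length : Int) * 1) = (0:Int) + (list.length : Int) from by ring]
      rw [map_pyRange_shift list.length 0 _ (fun k => list.getD k 0)]
      · exact map_range_getD list 0
      · intro k hk
        have hklt : (k : Int) < (list.length : Int) := by exact_mod_cast hk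
        rw [if_pos (by omega), show (0:Int) + (k:Int) = (k:Int) from by ring,
          PySem.List.pyGetD_natCast]
    rw [hfirst]
    rw [show (list.length : Int) * 1 + (list.length : Int) * (((multiple - 1).toNat : Nat) : Int)
        = (list.length : Int) * (1 + (((multiple - 1).toNat : Nat) : Int)) from by ring]
    rw [b_blocks list hl (multiple - 1).toNat 1 le_rfl]
    norm_num
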